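-- pv_equiv track=rewrite | github.com/aparedes0212/project-lifestyle | app_workout/services.py | _find_closest_subsequence
-- ===== SOURCE A (Python) =====
-- from typing import Optional, List, Dict, Tuple
--
-- def _find_closest_subsequence(text: List[int], pattern: List[int]) -> Tuple[Optional[int], int]:
--     """Return the position of the closest match of ``pattern`` within ``text``.
--
--     The function searches ``text`` from the end and returns a tuple of
--     ``(start_index, match_length)`` where ``match_length`` is the length of the
--     longest prefix of ``pattern`` that matches ``text`` starting at
--     ``start_index``. If ``match_length`` equals ``len(pattern)``, a full match is
--     found. When no elements match, ``(None, 0)`` is returned.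
--
--     This avoids the complexity of the previous KMP-based search while allowing
--     callers to handle cases where the log pattern only partially aligns with the
--     cardio plan.
--     """
--     if not pattern or not text:
--         return (None, 0)
--
--     best_start: Optional[int] = None
--     best_len = 0
--     pat_len = len(pattern)
--
--     for start in range(len(text) - 1, -1, -1):
--         match_len = 0
--         while (
--             start + match_len < len(text)
--             and match_len < pat_len
--             and text[start + match_len] == pattern[match_len]
--         ):
--             match_len += 1
--
--         if match_len > best_len:
--             best_len = match_len
--             best_start = start
--
--         if best_len == pat_len:
--             break
--
--     return best_start, best_len
-- ===== SOURCE B (Python) =====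
-- from typing import Optional, List, Tuple
--
-- def _find_closest_subsequence(text: List[int], pattern: List[int]) -> Tuple[Optional[int], int]:
--     """Z-algorithm re-implementation: O(n+m) instead of A's O(n*m) nested scan."""
--     if not pattern or not text:
--         return (None, 0)
--     s = pattern + [None] + text
--     n = len(s)
--     z = [0]
--     l = r = 0
--     for i in range(1, n):
--         k = min(r - i, z[i - l]) if i < r else 0
--         while i + k < n and s[k] == s[i + k]:
--             k += 1
--         z.append(k)
--         if i + k > r:
--             l, r = i, i + k
--     m = len(pattern)
--     best_start, best_len = None, 0
--     for start in range(len(text) - 1, -1, -1):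
--         ml = z[m + 1 + start]
--         if ml > best_len:
--             best_start, best_len = start, ml
--     return best_start, best_len
-- ===== Notes on version B (the rewrite author's own statement) =====
-- stated objective: faster
-- what changed: B replaces A's per-start while-loop rescans by the Z-algorithm on pattern+[None]+text, computing every prefix-match length in one linear pass, then a single scan picks the longest (latest) match.
import Mathlib
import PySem

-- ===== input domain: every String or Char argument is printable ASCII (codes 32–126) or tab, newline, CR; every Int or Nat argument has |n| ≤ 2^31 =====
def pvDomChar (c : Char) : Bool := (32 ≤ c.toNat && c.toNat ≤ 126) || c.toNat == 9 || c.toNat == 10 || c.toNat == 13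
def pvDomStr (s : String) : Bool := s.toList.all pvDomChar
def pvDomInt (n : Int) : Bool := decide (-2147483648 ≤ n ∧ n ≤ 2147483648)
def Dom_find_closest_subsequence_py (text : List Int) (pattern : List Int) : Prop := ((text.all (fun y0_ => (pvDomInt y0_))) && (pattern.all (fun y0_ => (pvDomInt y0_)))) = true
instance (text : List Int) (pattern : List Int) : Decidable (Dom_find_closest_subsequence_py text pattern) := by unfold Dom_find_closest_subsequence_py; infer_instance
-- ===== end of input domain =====

-- B replaces A's quadratic backwards scan (a fresh element-by-element while-loop at every
-- start position) by the Z-algorithm on pattern+[None]+text, which yields every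
-- prefix-match length in linear time, then a single scan picks the best (latest) start.

-- ===== PORT A =====
-- inner while loop of A: extends match_len while text[start+k] == pattern[k]
def pvA_while (text pattern : List Int) (start : Nat) (k : Nat) : Nat :=
  if h : start + k < text.length ∧ k < pattern.length ∧ text.getD (start + k) 0 = pattern.getD k 0 then
    pvA_while text pattern start (k + 1)
  else k
termination_by pattern.length - k
decreasing_by omega

-- A's for-loop over start = len(text)-1 .. 0, with the early break on a full match
def pvA_loop (text pattern : List Int) : List Nat → (Option Int × Nat) → Option Int × Nat
  | [], best => best
  | start :: rest, best =>
    let ml := pvA_while text pattern start 0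
    let best' := if best.2 < ml then ((some (start : Int)), ml) else best
    if best'.2 = pattern.length then best' else pvA_loop text pattern rest best'

def find_closest_subsequence_py (text : List Int) (pattern : List Int) : Option Int × Int :=
  if pattern = [] ∨ text = [] then (none, 0)
  else
    let res := pvA_loop text pattern ((List.range text.length).reverse) (none, 0)
    (res.1, (res.2 : Int))

-- ===== PORT B =====
-- the Z-algorithm while-extension: grows k while s[k] == s[i+k]
def pvB_ext (s : List (Option Int)) (n i k : Nat) : Nat :=
  if h : i + k < n ∧ s.getD k none = s.getD (i + k) none then
    pvB_ext s n i (k + 1)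
  else k
termination_by n - (i + k)
decreasing_by omega

-- the Z-algorithm main loop (i = 1 .. n-1), z built by append, window (l, r)
def pvB_zloop (s : List (Option Int)) (n : Nat) (i : Nat) (z : List Nat) (l r : Nat) : List Nat :=
  if _h : i < n then
    let k0 := if i < r then min (r - i) (z.getD (i - l) 0) else 0
    let k := pvB_ext s n i k0
    let z' := z ++ [k]
    if r < i + k then pvB_zloop s n (i + 1) z' i (i + k)
    else pvB_zloop s n (i + 1) z' l r
  else z
termination_by n - i

-- B's final scan: pick the max z-value over text positions, latest start wins
def pvB_sel (z : List Nat) (m : Nat) : List Nat → (Option Int × Nat) → Option Int × Nat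
  | [], best => best
  | start :: rest, best =>
    let ml := z.getD (m + 1 + start) 0
    pvB_sel z m rest (if best.2 < ml then ((some (start : Int)), ml) else best)

def find_closest_subsequence_py_alt (text : List Int) (pattern : List Int) : Option Int × Int :=
  if pattern = [] ∨ text = [] then (none, 0)
  else
    let s := pattern.map some ++ none :: text.map some
    let z := pvB_zloop s s.length 1 [0] 0 0
    let res := pvB_sel z pattern.length ((List.range text.length).reverse) (none, 0)
    (res.1, (res.2 : Int))

-- ===== PRECONDITION & SPEC =====
def Spec_find_closest_subsequence_py (text : List Int) (pattern : List Int) (out : Option Int × Int) : Prop := out = find_closest_subsequence_py_alt text pattern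
instance (text : List Int) (pattern : List Int) (out : Option Int × Int) : Decidable (Spec_find_closest_subsequence_py text pattern out) := by unfold Spec_find_closest_subsequence_py; infer_instance

-- ===== CLAIM (what is proved, stated in full; the proofs are below) =====
def Claim_equal_find_closest_subsequence_py : Prop := ∀ (text : List Int) (pattern : List Int), Dom_find_closest_subsequence_py text pattern → Spec_find_closest_subsequence_py text pattern (find_closest_subsequence_py text pattern)

-- ===== LEMMAS AND PROOFS =====

-- length of the longest common prefix
def pvLcp {α : Type} [DecidableEq α] : List α → List α → Nat
  | a :: as, b :: bs => if a = b then pvLcp as bs + 1 else 0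
  | _, _ => 0

theorem pvLcp_nil_left {α : Type} [DecidableEq α] (t : List α) : pvLcp ([] : List α) t = 0 := by
  cases t <;> rfl

theorem pvLcp_nil_right {α : Type} [DecidableEq α] (s : List α) : pvLcp s ([] : List α) = 0 := by
  cases s <;> rfl

theorem pvLcp_le_left {α : Type} [DecidableEq α] : ∀ (s t : List α), pvLcp s t ≤ s.length := by
  intro s
  induction s with
  | nil => intro t; simp [pvLcp_nil_left]
  | cons a as ih =>
    intro t
    cases t with
    | nil => simp [pvLcp_nil_right]
    | cons b bs =>
      simp only [pvLcp]
      split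
      · have := ih bs; simp [List.length_cons]; omega
      · simp

theorem pvLcp_comm {α : Type} [DecidableEq α] : ∀ (s t : List α), pvLcp s t = pvLcp t s := by
  intro s
  induction s with
  | nil => intro t; cases t <;> rfl
  | cons a as ih =>
    intro t
    cases t with
    | nil => rfl
    | cons b bs =>
      simp only [pvLcp]
      by_cases h : a = b
      · subst h; simp [ih bs]
      · rw [if_neg h, if_neg (fun hh => h hh.symm)]

theorem pvLcp_get {α : Type} [DecidableEq α] :
    ∀ (s t : List α) (a : Nat), a < pvLcp s t → s[a]? = t[a]? ∧ a < s.length := by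
  intro s
  induction s with
  | nil => intro t a h; simp [pvLcp_nil_left] at h
  | cons x xs ih =>
    intro t a h
    cases t with
    | nil => simp [pvLcp_nil_right] at h
    | cons y ys =>
      simp only [pvLcp] at h
      split at h
      · rename_i hxy
        cases a with
        | zero => subst hxy; simp
        | succ a' =>
          have := ih ys a' (by omega)
          simpa [List.getElem?_cons_succ] using this
      · omega

theorem le_pvLcp {α : Type} [DecidableEq α] :
    ∀ (s t : List α) (k : Nat), (∀ a, a < k → s[a]? = t[a]? ∧ a < s.length) → k ≤ pvLcp s t := by
  intro s
  induction s with
  | nil =>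
    intro t k h
    cases k with
    | zero => omega
    | succ k' => exact absurd (h 0 (by omega)).2 (by simp)
  | cons x xs ih =>
    intro t k h
    cases k with
    | zero => omega
    | succ k' =>
      have h0 := (h 0 (by omega)).1
      cases t with
      | nil => simp at h0
      | cons y ys =>
        simp at h0
        subst h0
        have hstep : pvLcp (x :: xs) (x :: ys) = pvLcp xs ys + 1 := by simp [pvLcp]
        rw [hstep]
        have : k' ≤ pvLcp xs ys := by
          apply ih
          intro a ha
          have := h (a + 1) (by omega)
          simpa [List.getElem?_cons_succ] using this
        omega

-- A's while loop computes the longest common prefix of text.drop start and pattern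
theorem pvA_while_eq (text pattern : List Int) (start : Nat) :
    ∀ k, pvA_while text pattern start k = k + pvLcp (text.drop (start + k)) (pattern.drop k) := by
  intro k
  fun_induction pvA_while text pattern start k with
  | case1 k h ih =>
    obtain ⟨h1, h2, h3⟩ := h
    have hd1 : text.drop (start + k) = text[start + k] :: text.drop (start + k + 1) :=
      (List.getElem_cons_drop h1).symm
    have hd2 : pattern.drop k = pattern[k] :: pattern.drop (k + 1) :=
      (List.getElem_cons_drop h2).symm
    have hget : text[start + k] = pattern[k] := by
      rwa [List.getD_eq_getElem _ _ h1, List.getD_eq_getElem _ _ h2] at h3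
    rw [ih, hd1, hd2]
    simp only [pvLcp, if_pos hget]
    have : start + (k + 1) = start + k + 1 := by omega
    rw [this]
    omega
  | case2 k h =>
    have hz : pvLcp (text.drop (start + k)) (pattern.drop k) = 0 := by
      by_cases h1 : start + k < text.length
      · by_cases h2 : k < pattern.length
        · have hd1 : text.drop (start + k) = text[start + k] :: text.drop (start + k + 1) :=
            (List.getElem_cons_drop h1).symm
          have hd2 : pattern.drop k = pattern[k] :: pattern.drop (k + 1) :=
            (List.getElem_cons_drop h2).symm
          rw [hd1, hd2]
          simp only [pvLcp]
          rw [if_neg]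
          intro he
          exact h ⟨h1, h2, by rw [List.getD_eq_getElem _ _ h1, List.getD_eq_getElem _ _ h2, he]⟩
        · rw [List.drop_eq_nil_of_le (show pattern.length ≤ k by omega), pvLcp_nil_right]
      · rw [List.drop_eq_nil_of_le (show text.length ≤ start + k by omega), pvLcp_nil_left]
    omega

-- the Z extension step lands exactly on the lcp, starting from any lower bound
theorem pvB_ext_eq (s : List (Option Int)) (i : Nat) (hi : 1 ≤ i) :
    ∀ k, k ≤ pvLcp s (s.drop i) → pvB_ext s s.length i k = pvLcp s (s.drop i) := by
  intro k hk
  fun_induction pvB_ext s s.length i k with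
  | case1 k h ih =>
    obtain ⟨h1, h2⟩ := h
    apply ih
    rcases Nat.lt_or_ge k (pvLcp s (s.drop i)) with hlt | hge
    · omega
    · -- k = lcp; show the condition would push past it, i.e. k+1 ≤ lcp
      apply le_pvLcp
      intro a ha
      rcases Nat.lt_or_ge a k with halt | hae
      · exact pvLcp_get s (s.drop i) a (by omega)
      · have hak : a = k := by omega
        subst hak
        have hkl : a < s.length := by omega
        refine ⟨?_, hkl⟩
        rw [List.getElem?_drop]
        rw [List.getD_eq_getElem _ _ hkl, List.getD_eq_getElem _ _ h1] at h2
        rw [List.getElem?_eq_getElem hkl, List.getElem?_eq_getElem h1, h2]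
  | case2 k h =>
    rcases Nat.lt_or_ge k (pvLcp s (s.drop i)) with hlt | hge
    · exfalso
      obtain ⟨hq, hklen⟩ := pvLcp_get s (s.drop i) k hlt
      have hdl : pvLcp s (s.drop i) ≤ (s.drop i).length := by
        rw [pvLcp_comm]; exact pvLcp_le_left _ _
      have hik : i + k < s.length := by
        simp [List.length_drop] at hdl; omega
      rw [List.getElem?_drop] at hq
      rw [List.getElem?_eq_getElem hklen, List.getElem?_eq_getElem hik] at hq
      simp at hq
      exact h ⟨hik, by rw [List.getD_eq_getElem _ _ hklen, List.getD_eq_getElem _ _ hik, hq]⟩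
    · omega

-- the window cap is a valid lower bound on the lcp at position i
theorem pvB_cap_le (s : List (Option Int)) (l i r : Nat) (hli : l < i) (hir : i < r)
    (hr : r ≤ l + pvLcp s (s.drop l)) :
    min (r - i) (pvLcp s (s.drop (i - l))) ≤ pvLcp s (s.drop i) := by
  apply le_pvLcp
  intro a ha
  have ha1 : a < r - i := by omega
  have ha2 : a < pvLcp s (s.drop (i - l)) := by omega
  obtain ⟨hq1, hlen1⟩ := pvLcp_get s (s.drop (i - l)) a ha2
  rw [List.getElem?_drop] at hq1
  have hb : i - l + a < pvLcp s (s.drop l) := by omega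
  obtain ⟨hq2, hlen2⟩ := pvLcp_get s (s.drop l) (i - l + a) hb
  rw [List.getElem?_drop] at hq2
  have harith : l + (i - l + a) = i + a := by omega
  rw [harith] at hq2
  refine ⟨?_, hlen1⟩
  rw [List.getElem?_drop, hq1, hq2]

-- the Z loop fills z with the lcp values, maintaining the window invariant
theorem pvB_zloop_spec (s : List (Option Int)) :
    ∀ d i z l r, s.length - i ≤ d → 1 ≤ i → i ≤ s.length → z.length = i → l < i →
      (l = 0 → r = 0) → r ≤ l + pvLcp s (s.drop l) →
      (∀ j, 1 ≤ j → j < i → z.getD j 0 = pvLcp s (s.drop j)) →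
      ∀ j, 1 ≤ j → j < s.length → (pvB_zloop s s.length i z l r).getD j 0 = pvLcp s (s.drop j) := by
  intro d
  induction d with
  | zero =>
    intro i z l r hd h1 h2 hlen hli hl0 hr hz j hj1 hj2
    have : i = s.length := by omega
    subst this
    rw [pvB_zloop, dif_neg (by omega)]
    exact hz j hj1 hj2
  | succ d ih =>
    intro i z l r hd h1 h2 hlen hli hl0 hr hz j hj1 hj2
    by_cases hin : i < s.length
    · rw [pvB_zloop, dif_pos hin]
      simp only
      set k0 := if i < r then min (r - i) (z.getD (i - l) 0) else 0 with hk0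
      have hk0le : k0 ≤ pvLcp s (s.drop i) := by
        rw [hk0]
        split
        · rename_i hirr
          have hlpos : 1 ≤ l := by
            by_contra hc
            have : l = 0 := by omega
            have := hl0 this
            omega
          have hil1 : 1 ≤ i - l := by omega
          have hil2 : i - l < i := by omega
          rw [hz (i - l) hil1 hil2]
          exact pvB_cap_le s l i r hli hirr hr
        · omega
      have hkval : pvB_ext s s.length i k0 = pvLcp s (s.drop i) := pvB_ext_eq s i h1 k0 hk0le
      set k := pvB_ext s s.length i k0 with hk
      have hz' : ∀ j', 1 ≤ j' → j' < i + 1 → (z ++ [k]).getD j' 0 = pvLcp s (s.drop j') := by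
        intro j' hj'1 hj'2
        rcases Nat.lt_or_ge j' i with hlt | hge
        · rw [List.getD_append _ _ _ _ (by omega)]
          exact hz j' hj'1 hlt
        · have : j' = i := by omega
          subst this
          have : (z ++ [k]).getD j' 0 = k := by
            rw [List.getD_eq_getElem?_getD, List.getElem?_append_right (by omega), hlen]
            simp
          rw [this, hkval]
      split
      · -- window update: l := i, r := i + k
        exact ih (i + 1) (z ++ [k]) i (i + k) (by omega) (by omega) (by omega)
          (by simp [hlen]) (by omega) (by omega) (by rw [hkval]) hz' j hj1 hj2
      · exact ih (i + 1) (z ++ [k]) l r (by omega) (by omega) (by omega)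
          (by simp [hlen]) (by omega) hl0 hr hz' j hj1 hj2
    · rw [pvB_zloop, dif_neg hin]
      exact hz j hj1 (by omega)

-- the separator makes lcp over the combined list equal to lcp over the ints
theorem pvLcp_sep : ∀ (p u t : List Int),
    pvLcp (p.map some ++ none :: t.map some) (u.map some) = pvLcp p u := by
  intro p
  induction p with
  | nil =>
    intro u t
    cases u with
    | nil => simp [pvLcp_nil_right, pvLcp]
    | cons a us => simp [pvLcp]
  | cons b ps ih =>
    intro u t
    cases u with
    | nil => simp [pvLcp_nil_right]
    | cons a us =>
      simp only [List.map_cons, List.cons_append, pvLcp]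
      by_cases h : b = a
      · subst h; simp [ih us t]
      · simp [h]

theorem pv_drop_sep (p t : List Int) (start : Nat) :
    (p.map some ++ none :: t.map some).drop (p.length + 1 + start) = (t.drop start).map some := by
  have h1 : p.length + 1 + start = (p.map some).length + (1 + start) := by
    simp [List.length_map]; omega
  rw [h1, List.drop_append]
  rw [List.drop_eq_nil_of_le (show (List.map some p).length ≤ (List.map some p).length + (1 + start) by omega)]
  have h2 : (List.map some p).length + (1 + start) - (List.map some p).length = start + 1 := by omega
  rw [h2]
  simp [List.map_drop]

-- A's loop equals B's selection scan, given z holds the lcp values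
theorem pv_sel_stay (text pattern : List Int) (z : List Nat)
    (hz : ∀ start, start < text.length →
      z.getD (pattern.length + 1 + start) 0 = pvLcp pattern (text.drop start)) :
    ∀ starts best, best.2 = pattern.length → (∀ st ∈ starts, st < text.length) →
      pvB_sel z pattern.length starts best = best := by
  intro starts
  induction starts with
  | nil => intro best _ _; rfl
  | cons start rest ih =>
    intro best hb hmem
    simp only [pvB_sel]
    have hst : start < text.length := hmem start (by simp)
    rw [hz start hst]
    have hle : pvLcp pattern (text.drop start) ≤ pattern.length := pvLcp_le_left _ _
    rw [if_neg (by omega)]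
    exact ih best hb (fun st h => hmem st (by simp [h]))

theorem pv_loops_eq (text pattern : List Int) (z : List Nat)
    (hz : ∀ start, start < text.length →
      z.getD (pattern.length + 1 + start) 0 = pvLcp pattern (text.drop start)) :
    ∀ starts best, (∀ st ∈ starts, st < text.length) →
      pvA_loop text pattern starts best = pvB_sel z pattern.length starts best := by
  intro starts
  induction starts with
  | nil => intro best _; rfl
  | cons start rest ih =>
    intro best hmem
    have hst : start < text.length := hmem start (by simp)
    have hml : pvA_while text pattern start 0 = z.getD (pattern.length + 1 + start) 0 := by
      rw [pvA_while_eq text pattern start 0, hz start hst]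
      simp [pvLcp_comm (text.drop start) pattern]
    simp only [pvA_loop, pvB_sel, hml]
    set best' := if best.2 < z.getD (pattern.length + 1 + start) 0
      then ((some (start : Int)), z.getD (pattern.length + 1 + start) 0) else best with hb'
    by_cases hfull : best'.2 = pattern.length
    · rw [if_pos hfull, (pv_sel_stay text pattern z hz rest best' hfull
        (fun st h => hmem st (by simp [h])))]
    · rw [if_neg hfull]
      exact ih best' (fun st h => hmem st (by simp [h]))

theorem pv_main (text pattern : List Int) :
    find_closest_subsequence_py text pattern = find_closest_subsequence_py_alt text pattern := by
  unfold find_closest_subsequence_py find_closest_subsequence_py_alt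
  by_cases hempty : pattern = [] ∨ text = []
  · rw [if_pos hempty, if_pos hempty]
  · rw [if_neg hempty, if_neg hempty]
    rw [not_or] at hempty
    obtain ⟨hp, ht⟩ := hempty
    have hplen : 1 ≤ pattern.length := List.length_pos_of_ne_nil hp
    have htlen : 1 ≤ text.length := List.length_pos_of_ne_nil ht
    set s := pattern.map some ++ none :: text.map some with hs
    have hslen : s.length = pattern.length + 1 + text.length := by
      simp [hs]; omega
    have hzspec : ∀ j, 1 ≤ j → j < s.length →
        (pvB_zloop s s.length 1 [0] 0 0).getD j 0 = pvLcp s (s.drop j) := by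
      apply pvB_zloop_spec s (s.length - 1) 1 [0] 0 0
      · omega
      · omega
      · omega
      · rfl
      · omega
      · intro _; rfl
      · simp
      · intro j hj1 hj2; omega
    have hz : ∀ start, start < text.length →
        (pvB_zloop s s.length 1 [0] 0 0).getD (pattern.length + 1 + start) 0 =
          pvLcp pattern (text.drop start) := by
      intro start hst
      rw [hzspec (pattern.length + 1 + start) (by omega) (by omega)]
      rw [pv_drop_sep pattern text start, pvLcp_sep]
    have := pv_loops_eq text pattern (pvB_zloop s s.length 1 [0] 0 0) hz
      ((List.range text.length).reverse) (none, 0)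
      (by intro st h; rw [List.mem_reverse, List.mem_range] at h; exact h)
    rw [this]

-- ===== VERDICT (by name: the statement is the Claim_ definition above) =====
theorem find_closest_subsequence_py_spec : Claim_equal_find_closest_subsequence_py := by
  intro text pattern _
  unfold Spec_find_closest_subsequence_py
  exact pv_main text pattern
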